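-- pv_equiv track=rewrite | github.com/mpolynskyi/orbitz_seleniumbase | tests/base_test.py | cities_loop_as_pairs
-- ===== SOURCE A (Python) =====
-- def cities_loop_as_pairs(city_list):
--     """
--     >>cities_loop_as_pairs(["New York", "Los Angeles", "Dallas"])
--     [['New York', 'Los Angeles'], ['Los Angeles', 'Dallas'], ['Dallas', 'New York']]
--     """
--     res = []
--     for item in city_list[1:]:
--         res.append(item)
--         res.append(item)
--     res = [city_list[0]] + res + [city_list[0]]
--     pairs = [[res[i], res[i + 1]] for i in range(len(res) - 1)[::2]]
--     return pairs
-- ===== SOURCE B (Python) =====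
-- def cities_loop_as_pairs(city_list):
--     n = len(city_list)
--     return [[city_list[i], city_list[(i + 1) % n]] for i in range(n)]
-- ===== Notes on version B (the rewrite author's own statement) =====
-- stated objective: simpler
-- what changed: Replaces the doubled intermediate list and stride-2 reindexing with a direct single comprehension pairing each element with its cyclic successor via (i+1) % n.
-- outside the precondition, e.g. on cities_loop_as_pairs([]): A raises IndexError, B returns []
import Mathlib
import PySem

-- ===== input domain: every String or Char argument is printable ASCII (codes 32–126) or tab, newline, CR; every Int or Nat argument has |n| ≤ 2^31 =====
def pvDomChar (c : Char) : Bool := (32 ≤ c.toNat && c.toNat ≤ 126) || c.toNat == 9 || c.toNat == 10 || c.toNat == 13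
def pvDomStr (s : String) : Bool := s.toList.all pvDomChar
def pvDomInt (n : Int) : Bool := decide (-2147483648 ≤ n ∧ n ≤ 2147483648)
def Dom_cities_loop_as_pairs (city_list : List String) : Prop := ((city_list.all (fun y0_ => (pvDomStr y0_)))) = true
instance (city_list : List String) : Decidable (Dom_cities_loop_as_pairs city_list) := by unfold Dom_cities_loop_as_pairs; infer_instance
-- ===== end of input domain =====

-- B replaces A's doubled intermediate list and stride-2 reindexing by one direct
-- comprehension pairing each element with its cyclic successor via (i+1) % n.


-- ===== PORT A =====
def cities_loop_as_pairs (city_list : List String) : List (List String) :=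
  let res := (PySem.List.slice city_list (some 1) none).foldl
      (fun r item => (r ++ [item]) ++ [item]) []
  let res2 := [PySem.List.pyGetD city_list 0 ""] ++ res ++ [PySem.List.pyGetD city_list 0 ""]
  -- range(len(res)-1)[::2] is range(0, len(res)-1, 2) (Python range slicing) — exact
  (PySem.List.pyRange 0 ((res2.length : Int) - 1) 2).map
    (fun i => [PySem.List.pyGetD res2 i "", PySem.List.pyGetD res2 (i + 1) ""])

-- ===== PORT B =====
def cities_loop_as_pairs_alt (city_list : List String) : List (List String) :=
  let n : Int := city_list.length
  (PySem.List.pyRange 0 n 1).map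
    (fun i => [PySem.List.pyGetD city_list i "",
               PySem.List.pyGetD city_list (PySem.Int.mod (i + 1) n) ""])

-- ===== PRECONDITION & SPEC =====
-- Pre_ excludes only the empty list, on which A raises IndexError (city_list[0]); B returns [] there.
def Pre_cities_loop_as_pairs (city_list : List String) : Prop := city_list ≠ []
instance (city_list : List String) : Decidable (Pre_cities_loop_as_pairs city_list) := by unfold Pre_cities_loop_as_pairs; infer_instance
def pvWitness_cities_loop_as_pairs : List String := ["New York", "Los Angeles", "Dallas"]

def Spec_cities_loop_as_pairs (city_list : List String) (out : List (List String)) : Prop := out = cities_loop_as_pairs_alt city_list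
instance (city_list : List String) (out : List (List String)) : Decidable (Spec_cities_loop_as_pairs city_list out) := by unfold Spec_cities_loop_as_pairs; infer_instance

-- ===== CLAIM (what is proved, stated in full; the proofs are below) =====
def Claim_equal_cities_loop_as_pairs : Prop := ∀ (city_list : List String), Dom_cities_loop_as_pairs city_list → Pre_cities_loop_as_pairs city_list → Spec_cities_loop_as_pairs city_list (cities_loop_as_pairs city_list)

-- ===== LEMMAS AND PROOFS =====

theorem dup_len (l : List String) :
    (l.flatMap fun y => [y, y]).length = 2 * l.length := by
  induction l with
  | nil => simp
  | cons y l ih => simp [ih]; omega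

theorem dup_getD_even (d : String) :
    ∀ (l : List String) (j : Nat) (t : List String), j < l.length →
      ((l.flatMap fun y => [y, y]) ++ t).getD (2 * j) d = l.getD j d := by
  intro l
  induction l with
  | nil => intro j t h; simp at h
  | cons y l ih =>
    intro j t h
    cases j with
    | zero => simp
    | succ j' =>
      have h2 : 2 * (j' + 1) = 2 * j' + 1 + 1 := by omega
      simp only [List.flatMap_cons, List.cons_append, List.append_assoc, h2,
        List.getD_cons_succ]
      exact ih j' t (by simpa using h)

theorem dup_getD_odd (d : String) :
    ∀ (l : List String) (j : Nat) (t : List String), j < l.length →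
      ((l.flatMap fun y => [y, y]) ++ t).getD (2 * j + 1) d = l.getD j d := by
  intro l
  induction l with
  | nil => intro j t h; simp at h
  | cons y l ih =>
    intro j t h
    cases j with
    | zero => simp
    | succ j' =>
      have h2 : 2 * (j' + 1) + 1 = 2 * j' + 1 + 1 + 1 := by omega
      simp only [List.flatMap_cons, List.cons_append, List.append_assoc, h2,
        List.getD_cons_succ]
      exact ih j' t (by simpa using h)

theorem getD_append_len (D : List String) (x : String) (d : String) :
    (D ++ [x]).getD D.length d = x := by
  simp [List.getD]

-- ===== VERDICT (by name: the statement is the Claim_ definition above) =====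
theorem cities_loop_as_pairs_spec : Claim_equal_cities_loop_as_pairs := by
  intro xs _ hpre
  unfold Spec_cities_loop_as_pairs
  obtain ⟨x, rest, rfl⟩ := List.exists_cons_of_ne_nil hpre
  unfold cities_loop_as_pairs cities_loop_as_pairs_alt
  dsimp only
  set m := rest.length with hm
  set D := rest.flatMap (fun y => [y, y]) with hD
  have hres : (PySem.List.slice (x :: rest) (some 1) none).foldl
      (fun r item => (r ++ [item]) ++ [item]) [] = D := by
    rw [PySem.List.slice_from_one]
    simp only [List.tail_cons]
    rw [PySem.List.foldl_congr_mem _ _ (fun acc y => acc ++ [y, y]) []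
      (by intro acc y _; simp)]
    simpa [hD] using PySem.List.foldl_append_eq_flatMap (fun y => [y, y]) rest []
  rw [hres]
  have hDlen : D.length = 2 * m := by rw [hD, hm]; exact dup_len rest
  have hg0 : PySem.List.pyGetD (x :: rest) 0 "" = x := by
    simp [PySem.List.pyGetD_zero_cons]
  rw [hg0]
  have hlen2 : (([x] ++ D ++ [x]).length : Int) - 1 = 2 * (m : Int) + 1 := by
    simp [hDlen]
  rw [hlen2]
  rw [PySem.List.pyRange_of_pos 0 (2 * (m : Int) + 1) (by norm_num)]
  rw [PySem.List.pyRange_one 0 (((x :: rest).length : Nat) : Int)]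
  have hc1 : (if (0:Int) < 2 * (m:Int) + 1 then ((2 * (m:Int) + 1 - 0 + 2 - 1) / 2).toNat else 0) = m + 1 := by
    rw [if_pos (by positivity)]; omega
  have hc2 : ((((x :: rest).length : Nat) : Int) - 0).toNat = m + 1 := by
    simp [hm]
  rw [hc1, hc2, List.map_map, List.map_map]
  apply List.map_congr_left
  intro k hk
  have hkm : k < m + 1 := List.mem_range.mp hk
  simp only [Function.comp, zero_add]
  have hR : [x] ++ D ++ [x] = x :: (D ++ [x]) := by simp
  have e1 : PySem.List.pyGetD ([x] ++ D ++ [x]) (2 * (k : Int)) "" = (x :: rest).getD k "" := by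
    have hcast : (2 * (k : Int)) = ((2 * k : Nat) : Int) := by push_cast; ring
    rw [hcast, PySem.List.pyGetD_natCast, hR]
    cases k with
    | zero => simp
    | succ j =>
      have h2 : 2 * (j + 1) = 2 * j + 1 + 1 := by omega
      rw [h2, List.getD_cons_succ, dup_getD_odd "" rest j [x] (by omega)]
      simp
  have e2 : PySem.List.pyGetD ([x] ++ D ++ [x]) (2 * (k : Int) + 1) "" =
      PySem.List.pyGetD (x :: rest) (PySem.Int.mod ((k : Int) + 1) (((x :: rest).length : Nat) : Int)) "" := by
    have hcast : (2 * (k : Int) + 1) = ((2 * k + 1 : Nat) : Int) := by push_cast; ring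
    rw [hcast, PySem.List.pyGetD_natCast, hR, List.getD_cons_succ]
    have hmod : PySem.Int.mod ((k : Int) + 1) (((x :: rest).length : Nat) : Int) = (((k + 1) % (m + 1) : Nat) : Int) := by
      rw [PySem.Int.mod_eq_emod_of_pos (by simp)]
      simp only [List.length_cons, hm]
      push_cast
      omega
    rw [hmod, PySem.List.pyGetD_natCast]
    by_cases hcase : k < m
    · rw [dup_getD_even "" rest k [x] (by omega)]
      have : (k + 1) % (m + 1) = k + 1 := Nat.mod_eq_of_lt (by omega)
      rw [this, List.getD_cons_succ]
    · have hk' : k = m := by omega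
      subst hk'
      have h2 : 2 * m = D.length := by omega
      rw [h2, getD_append_len]
      have : (m + 1) % (m + 1) = 0 := Nat.mod_self _
      rw [this]
      simp
  have e3 : PySem.List.pyGetD (x :: rest) (k : Int) "" = (x :: rest).getD k "" :=
    PySem.List.pyGetD_natCast _ _ _
  rw [e1, e2, e3]
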